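-- pv_equiv track=rewrite | github.com/dikshantsharma12/Data-Analysis | un_data_analytics/Q4.py | transfrom_data_to_plot
-- ===== SOURCE A (Python) =====
-- from collections import defaultdict
--
-- def transfrom_data_to_plot(population_per_year):
--     """Transfromation of data for plotting"""
--     year=[]
--     temp=defaultdict(list)
--     for key,value in population_per_year.items():
--         year.append(key)
--         for con,pop in value.items():
--             temp[con].append(pop)
--
--     country=list(temp.keys())
--     population=list(temp.values())
--
--     return country,year,population
-- ===== SOURCE B (Python) =====
-- def transfrom_data_to_plot(population_per_year):
--     """Transfromation of data for plotting"""
--     year = list(population_per_year.keys())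
--     country = list(dict.fromkeys(
--         c for d in population_per_year.values() for c in d))
--     population = [[d[c] for d in population_per_year.values() if c in d]
--                   for c in country]
--     return country, year, population
-- ===== Notes on version B (the rewrite author's own statement) =====
-- stated objective: simpler
-- what changed: Instead of one nested mutating loop filling a defaultdict, B builds the three outputs independently: years by a keys() call, the country order by an ordered dedup (dict.fromkeys) over all inner keys, and each country's population list by a comprehension over the years that keeps the value when the country is present.
import Mathlib
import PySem

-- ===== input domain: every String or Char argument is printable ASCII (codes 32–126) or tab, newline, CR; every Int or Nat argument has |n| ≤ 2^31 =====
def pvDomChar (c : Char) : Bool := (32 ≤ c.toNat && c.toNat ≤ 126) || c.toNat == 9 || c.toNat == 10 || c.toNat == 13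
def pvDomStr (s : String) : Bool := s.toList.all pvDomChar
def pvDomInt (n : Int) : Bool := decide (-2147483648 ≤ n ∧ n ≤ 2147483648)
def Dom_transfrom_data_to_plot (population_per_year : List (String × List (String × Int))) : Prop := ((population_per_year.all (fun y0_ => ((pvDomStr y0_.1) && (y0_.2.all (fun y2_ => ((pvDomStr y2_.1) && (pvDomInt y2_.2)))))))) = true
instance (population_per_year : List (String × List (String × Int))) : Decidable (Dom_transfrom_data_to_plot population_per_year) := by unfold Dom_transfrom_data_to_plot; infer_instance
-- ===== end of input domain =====

-- B builds the three result lists independently (keys, ordered dedup of inner keys, per-country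
-- lookup across the years) instead of A's nested mutating loop over a defaultdict.

-- ===== PORT A =====
-- inner loop 'for con,pop in value.items(): temp[con].append(pop)' (defaultdict(list))
def pvAYear (d : PySem.Dict String (List Int)) (kv : String × List (String × Int)) :
    PySem.Dict String (List Int) :=
  kv.2.foldl (fun d p => d.modify p.1 [] (fun l => l ++ [p.2])) d

def transfrom_data_to_plot (population_per_year : List (String × List (String × Int))) :
    List String × List String × List (List Int) :=
  let st := population_per_year.foldl
    (fun (st : List String × PySem.Dict String (List Int)) kv =>
      (st.1 ++ [kv.1], pvAYear st.2 kv))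
    ([], PySem.Dict.empty)
  (st.2.keys, st.1, st.2.values)

-- ===== PORT B =====
def transfrom_data_to_plot_alt (population_per_year : List (String × List (String × Int))) :
    List String × List String × List (List Int) :=
  let year := population_per_year.map (·.1)
  let country := PySem.List.dedup
    (population_per_year.flatMap (fun yv => yv.2.map (·.1)))
  let population := country.map (fun c =>
    population_per_year.filterMap (fun yv => yv.2.lookup c))
  (country, year, population)

-- ===== PRECONDITION & SPEC =====
-- Pre_ excludes association lists in which some year's inner list repeats a country key:
-- such inputs do not represent a Python dict[str, dict[str, int]] and can never reach A.
def Pre_transfrom_data_to_plot (population_per_year : List (String × List (String × Int))) : Prop :=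
  ∀ yv ∈ population_per_year, (yv.2.map (·.1)).Nodup
instance (population_per_year : List (String × List (String × Int))) : Decidable (Pre_transfrom_data_to_plot population_per_year) := by unfold Pre_transfrom_data_to_plot; infer_instance

def pvWitness_transfrom_data_to_plot : (List (String × List (String × Int))) :=
  [("2000", [("India", 1000)]), ("2001", [("India", 1100), ("China", 1200)])]

def Spec_transfrom_data_to_plot (population_per_year : List (String × List (String × Int))) (out : List String × List String × List (List Int)) : Prop := out = transfrom_data_to_plot_alt population_per_year
instance (population_per_year : List (String × List (String × Int))) (out : List String × List String × List (List Int)) : Decidable (Spec_transfrom_data_to_plot population_per_year out) := by unfold Spec_transfrom_data_to_plot; infer_instance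

-- ===== CLAIM (what is proved, stated in full; the proofs are below) =====
def Claim_equal_transfrom_data_to_plot : Prop := ∀ (population_per_year : List (String × List (String × Int))), Dom_transfrom_data_to_plot population_per_year → Pre_transfrom_data_to_plot population_per_year → Spec_transfrom_data_to_plot population_per_year (transfrom_data_to_plot population_per_year)

-- ===== LEMMAS AND PROOFS =====

-- the outer fold splits into the year list and the dict fold
theorem pvFoldSplit (l : List (String × List (String × Int)))
    (ys : List String) (d : PySem.Dict String (List Int)) :
    l.foldl (fun (st : List String × PySem.Dict String (List Int)) kv =>
        (st.1 ++ [kv.1], pvAYear st.2 kv)) (ys, d)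
      = (ys ++ l.map (·.1), l.foldl pvAYear d) := by
  induction l generalizing ys d with
  | nil => simp
  | cons h t ih => simp [List.foldl_cons, ih]

theorem pvKeysTemp (l : List (String × List (String × Int)))
    (d : PySem.Dict String (List Int)) :
    (l.foldl pvAYear d).keys
      = PySem.Set.update d.keys (l.flatMap (fun kv => kv.2.map (·.1))) := by
  induction l generalizing d with
  | nil => simp [PySem.Set.update]
  | cons h t ih =>
      simp only [List.foldl_cons, List.flatMap_cons, ih, pvAYear,
        PySem.Dict.keys_foldl_modify_key, PySem.Set.update, List.foldl_append]

theorem pvNodupTemp (l : List (String × List (String × Int)))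
    (d : PySem.Dict String (List Int)) (h : d.keys.Nodup) :
    (l.foldl pvAYear d).keys.Nodup := by
  induction l generalizing d with
  | nil => exact h
  | cons x t ih =>
      refine ih _ ?_
      unfold pvAYear
      exact PySem.Dict.nodup_keys_foldl_modify_key x.2 (·.1) []
        (fun _ p l => l ++ [p.2]) d h

theorem pvGetDTemp (l : List (String × List (String × Int)))
    (d : PySem.Dict String (List Int)) (c : String) :
    (l.foldl pvAYear d).getD c []
      = d.getD c [] ++ l.flatMap (fun kv => (kv.2.filter (fun p => p.1 == c)).map (·.2)) := by
  induction l generalizing d with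
  | nil => simp
  | cons h t ih =>
      simp only [List.foldl_cons, List.flatMap_cons, ih, pvAYear,
        PySem.Dict.getD_foldl_modify_append, List.append_assoc]

theorem pvValuesEq (d : PySem.Dict String (List Int)) (h : d.keys.Nodup) :
    d.values = d.keys.map (fun k => d.getD k []) := by
  show d.items.map (·.2) = (d.items.map (·.1)).map (fun k => d.getD k [])
  rw [List.map_map]
  refine List.map_congr_left (fun p hp => ?_)
  obtain ⟨k, v⟩ := p
  exact (PySem.Dict.getD_of_mem_items d hp h []).symm

theorem pvFilterLookup (l : List (String × Int)) (c : String)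
    (h : (l.map (·.1)).Nodup) :
    (l.filter (fun p => p.1 == c)).map (·.2) = (l.lookup c).toList := by
  induction l with
  | nil => simp
  | cons x t ih =>
      simp only [List.map_cons, List.nodup_cons] at h
      by_cases hc : x.1 = c
      · subst hc
        have hnil : t.filter (fun p => p.1 == x.1) = [] := by
          refine List.filter_eq_nil_iff.mpr (fun p hp => ?_)
          simp only [beq_iff_eq]
          intro e
          exact h.1 (e ▸ List.mem_map_of_mem hp)
        simp [List.lookup, hnil]
      · have hb : (x.1 == c) = false := by simpa using hc
        have hb2 : (c == x.1) = false := by simpa using (Ne.symm hc)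
        simp [List.lookup, hb, hb2, ih h.2]

theorem pvFlatMapCongr {α β : Type} (l : List α) (f g : α → List β)
    (h : ∀ x ∈ l, f x = g x) : l.flatMap f = l.flatMap g := by
  induction l with
  | nil => rfl
  | cons x t ih => simp [List.flatMap_cons, h x (by simp), ih (fun y hy => h y (by simp [hy]))]

-- ===== VERDICT (by name: the statement is the Claim_ definition above) =====
theorem transfrom_data_to_plot_spec : Claim_equal_transfrom_data_to_plot := by
  intro ppy _ hpre
  show transfrom_data_to_plot ppy = transfrom_data_to_plot_alt ppy
  unfold transfrom_data_to_plot transfrom_data_to_plot_alt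
  rw [pvFoldSplit]
  simp only [List.nil_append]
  have hkeys : (ppy.foldl pvAYear PySem.Dict.empty).keys
      = PySem.List.dedup (ppy.flatMap (fun yv => yv.2.map (·.1))) := by
    rw [pvKeysTemp]
    simp [PySem.List.dedup_eq_ofList, PySem.Set.ofList_eq_foldl, PySem.Set.update,
      PySem.Dict.keys_empty]
  refine Prod.ext hkeys (Prod.ext rfl ?_)
  show (ppy.foldl pvAYear PySem.Dict.empty).values = _
  rw [pvValuesEq _ (pvNodupTemp ppy PySem.Dict.empty (by simp)), hkeys]
  refine List.map_congr_left (fun c _ => ?_)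
  rw [pvGetDTemp, PySem.Dict.getD_empty, List.nil_append,
    List.filterMap_eq_flatMap_toList]
  exact pvFlatMapCongr _ _ _ (fun yv hy => pvFilterLookup yv.2 c (hpre yv hy))
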